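-- pv_equiv track=rewrite | github.com/CandySweet997/social_media | register2App/forms.py | phone_checker
-- ===== SOURCE A (Python) =====
-- def phone_checker(s):
--     alphabet = ['a', 'b', 'c', 'd', 'e', 'f', 'g', 'h', 'i', 'j', 'k', 'l', 'm', 'n', 'o', 'p', 'q', 'r', 's', 't', 'u',
--                 'v', 'w', 'x', 'y', 'z']
--     for i in alphabet:
--         if i in s:
--             return False
--         elif i.upper() in s:
--             return False
--
--     return True
-- ===== SOURCE B (Python) =====
-- def phone_checker(s):
--     return not any('a' <= c <= 'z' or 'A' <= c <= 'Z' for c in s)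
-- ===== Notes on version B (the rewrite author's own statement) =====
-- stated objective: idiomatic
-- what changed: B makes one pass over the input characters with any() and an ASCII-letter range test, instead of A's loop over the 26-letter alphabet with a substring scan of s per letter (and per uppercase letter).
import Mathlib
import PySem

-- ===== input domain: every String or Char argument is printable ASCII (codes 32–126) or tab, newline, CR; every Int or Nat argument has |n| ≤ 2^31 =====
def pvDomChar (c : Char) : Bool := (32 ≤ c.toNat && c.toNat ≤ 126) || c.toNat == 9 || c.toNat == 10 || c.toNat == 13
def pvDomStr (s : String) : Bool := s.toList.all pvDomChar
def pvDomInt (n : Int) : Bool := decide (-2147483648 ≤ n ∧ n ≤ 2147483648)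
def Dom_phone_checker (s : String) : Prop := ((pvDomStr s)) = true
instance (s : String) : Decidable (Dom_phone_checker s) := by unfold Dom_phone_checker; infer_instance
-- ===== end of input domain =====

-- B replaces A's 26-letter alphabet loop with per-letter substring scans by a single
-- pass over the input characters testing the ASCII letter ranges (idiomatic; same result).
-- (grader preamble stays above)

-- ===== PORT A =====
def pcAlphabet : List String := ["a", "b", "c", "d", "e", "f", "g", "h", "i", "j", "k", "l", "m", "n", "o", "p", "q", "r", "s", "t", "u", "v", "w", "x", "y", "z"]

def pcLoop (s : String) : List String → Bool
  | [] => true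
  | i :: rest =>
    if PySem.Str.isIn i s then false
    else if PySem.Str.isIn (PySem.Str.upper i) s then false
    else pcLoop s rest

def phone_checker (s : String) : Bool := pcLoop s pcAlphabet

-- ===== PORT B =====
def phone_checker_alt (s : String) : Bool :=
  !(s.toList.any (fun c => decide ('a' ≤ c ∧ c ≤ 'z') || decide ('A' ≤ c ∧ c ≤ 'Z')))

-- ===== PRECONDITION & SPEC =====
def Spec_phone_checker (s : String) (out : Bool) : Prop := out = phone_checker_alt s
instance (s : String) (out : Bool) : Decidable (Spec_phone_checker s out) := by unfold Spec_phone_checker; infer_instance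

-- ===== CLAIM (what is proved, stated in full; the proofs are below) =====
def Claim_equal_phone_checker : Prop := ∀ (s : String), Dom_phone_checker s → Spec_phone_checker s (phone_checker s)

-- ===== LEMMAS AND PROOFS =====

theorem pcLoop_eq_all (s : String) (l : List String) :
    pcLoop s l = l.all (fun i => !PySem.Str.isIn i s && !PySem.Str.isIn (PySem.Str.upper i) s) := by
  induction l with
  | nil => rfl
  | cons i rest ih =>
    simp only [pcLoop, List.all_cons, ← ih]
    split_ifs with h1 h2 <;> simp_all

-- a char satisfies B's range test iff it is one of the 52 ASCII letters
theorem pcLetters (c : Char) :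
    (('a' ≤ c ∧ c ≤ 'z') ∨ ('A' ≤ c ∧ c ≤ 'Z')) ↔ c ∈ (['a', 'A', 'b', 'B', 'c', 'C', 'd', 'D', 'e', 'E', 'f', 'F', 'g', 'G', 'h', 'H', 'i', 'I', 'j', 'J', 'k', 'K', 'l', 'L', 'm', 'M', 'n', 'N', 'o', 'O', 'p', 'P', 'q', 'Q', 'r', 'R', 's', 'S', 't', 'T', 'u', 'U', 'v', 'V', 'w', 'W', 'x', 'X', 'y', 'Y', 'z', 'Z'] : List Char) := by
  simp only [List.mem_cons, List.not_mem_nil, or_false, Char.le_def,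
    UInt32.le_iff_toNat_le, Char.ext_iff, UInt32.ext_iff, show ('a').val.toNat = 97 from by decide, show ('b').val.toNat = 98 from by decide, show ('c').val.toNat = 99 from by decide, show ('d').val.toNat = 100 from by decide, show ('e').val.toNat = 101 from by decide, show ('f').val.toNat = 102 from by decide, show ('g').val.toNat = 103 from by decide, show ('h').val.toNat = 104 from by decide, show ('i').val.toNat = 105 from by decide, show ('j').val.toNat = 106 from by decide, show ('k').val.toNat = 107 from by decide, show ('l').val.toNat = 108 from by decide, show ('m').val.toNat = 109 from by decide, show ('n').val.toNat = 110 from by decide, show ('o').val.toNat = 111 from by decide, show ('p').val.toNat = 112 from by decide, show ('q').val.toNat = 113 from by decide, show ('r').val.toNat = 114 from by decide, show ('s').val.toNat = 115 from by decide, show ('t').val.toNat = 116 from by decide, show ('u').val.toNat = 117 from by decide, show ('v').val.toNat = 118 from by decide, show ('w').val.toNat = 119 from by decide, show ('x').val.toNat = 120 from by decide, show ('y').val.toNat = 121 from by decide, show ('z').val.toNat = 122 from by decide, show ('A').val.toNat = 65 from by decide, show ('B').val.toNat = 66 from by decide, show ('C').val.toNat = 67 from by decide, show ('D').val.toNat =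 68 from by decide, show ('E').val.toNat = 69 from by decide, show ('F').val.toNat = 70 from by decide, show ('G').val.toNat = 71 from by decide, show ('H').val.toNat = 72 from by decide, show ('I').val.toNat = 73 from by decide, show ('J').val.toNat = 74 from by decide, show ('K').val.toNat = 75 from by decide, show ('L').val.toNat = 76 from by decide, show ('M').val.toNat = 77 from by decide, show ('N').val.toNat = 78 from by decide, show ('O').val.toNat = 79 from by decide, show ('P').val.toNat = 80 from by decide, show ('Q').val.toNat = 81 from by decide, show ('R').val.toNat = 82 from by decide, show ('S').val.toNat = 83 from by decide, show ('T').val.toNat = 84 from by decide, show ('U').val.toNat = 85 from by decide, show ('V').val.toNat = 86 from by decide, show ('W').val.toNat = 87 from by decide, show ('X').val.toNat = 88 from by decide, show ('Y').val.toNat = 89 from by decide, show ('Z').val.toNat = 90 from by decide]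
  omega

theorem pc_eq (s : String) : phone_checker s = phone_checker_alt s := by
  rw [phone_checker, pcLoop_eq_all, phone_checker_alt, Bool.eq_iff_iff]
  simp only [pcAlphabet, List.all_cons, List.all_nil, Bool.and_eq_true, Bool.and_true,
    Bool.not_eq_true', PySem.Str.isIn_eq, show PySem.Str.upper "a" = "A" from by decide, show PySem.Str.upper "b" = "B" from by decide, show PySem.Str.upper "c" = "C" from by decide, show PySem.Str.upper "d" = "D" from by decide, show PySem.Str.upper "e" = "E" from by decide, show PySem.Str.upper "f" = "F" from by decide, show PySem.Str.upper "g" = "G" from by decide, show PySem.Str.upper "h" = "H" from by decide, show PySem.Str.upper "i" = "I" from by decide, show PySem.Str.upper "j" = "J" from by decide, show PySem.Str.upper "k" = "K" from by decide, show PySem.Str.upper "l" = "L" from by decide, show PySem.Str.upper "m" = "M" from by decide, show PySem.Str.upper "n" = "N" from by decide, show PySem.Str.upper "o" = "O" from by decide, show PySem.Str.upper "p" = "P" from by decide, show PySem.Str.upper "q" = "Q" from by decide, show PySem.Str.upper "r" = "R" from by decide, show PySem.Str.upper "s" = "S" from by decide, show PySem.Str.upper "t" = "T" from by decide, show PySem.Str.upper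 "u" = "U" from by decide, show PySem.Str.upper "v" = "V" from by decide, show PySem.Str.upper "w" = "W" from by decide, show PySem.Str.upper "x" = "X" from by decide, show PySem.Str.upper "y" = "Y" from by decide, show PySem.Str.upper "z" = "Z" from by decide]
  simp only [PySem.Chars.isIn_eq_false_iff, show ("a" : String).toList = ['a'] from by decide, show ("A" : String).toList = ['A'] from by decide, show ("b" : String).toList = ['b'] from by decide, show ("B" : String).toList = ['B'] from by decide, show ("c" : String).toList = ['c'] from by decide, show ("C" : String).toList = ['C'] from by decide, show ("d" : String).toList = ['d'] from by decide, show ("D" : String).toList = ['D'] from by decide, show ("e" : String).toList = ['e'] from by decide, show ("E" : String).toList = ['E'] from by decide, show ("f" : String).toList = ['f'] from by decide, show ("F" : String).toList = ['F'] from by decide, show ("g" : String).toList = ['g'] from by decide, show ("G" : String).toList = ['G'] from by decide, show ("h" : String).toList = ['h'] from by decide, show ("H" : String).toList = ['H'] from by decide, show ("i" : String).toList = ['i'] from by decide, show ("I" : String).toList = ['I'] from by decide, show ("j" : String).toList = ['j'] from by decide, show ("J" : String).toList = ['J'] from by decide, show ("k" : String).toList = ['k'] from by decide, show ("K" : String).toList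 = ['K'] from by decide, show ("l" : String).toList = ['l'] from by decide, show ("L" : String).toList = ['L'] from by decide, show ("m" : String).toList = ['m'] from by decide, show ("M" : String).toList = ['M'] from by decide, show ("n" : String).toList = ['n'] from by decide, show ("N" : String).toList = ['N'] from by decide, show ("o" : String).toList = ['o'] from by decide, show ("O" : String).toList = ['O'] from by decide, show ("p" : String).toList = ['p'] from by decide, show ("P" : String).toList = ['P'] from by decide, show ("q" : String).toList = ['q'] from by decide, show ("Q" : String).toList = ['Q'] from by decide, show ("r" : String).toList = ['r'] from by decide, show ("R" : String).toList = ['R'] from by decide, show ("s" : String).toList = ['s'] from by decide, show ("S" : String).toList = ['S'] from by decide, show ("t" : String).toList = ['t'] from by decide, show ("T" : String).toList = ['T'] from by decide, show ("u" : String).toList = ['u'] from by decide, show ("U" : String).toList = ['U'] from by decide, show ("v" : String).toList = ['v'] from by decide, show ("V" : String).toList = ['V'] from by decide, show ("w" : String).toList = ['w'] from by decide, show ("W" : String).toList = ['W'] from by decide, show ("x" : String).toList = ['x'] from by decide, show ("X" : String).toList = ['X'] from by decide, show ("y" : String).toList = ['y'] from by decide, show ("Y" : String).toList = ['Y'] from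 by decide, show ("z" : String).toList = ['z'] from by decide, show ("Z" : String).toList = ['Z'] from by decide, List.singleton_infix_iff,
    List.any_eq_false, Bool.or_eq_true, decide_eq_true_eq, not_or]
  constructor
  · intro h c hcm
    rw [← not_or]
    intro hrange
    obtain ⟨⟨wa1, wa2⟩, ⟨wb1, wb2⟩, ⟨wc1, wc2⟩, ⟨wd1, wd2⟩, ⟨we1, we2⟩, ⟨wf1, wf2⟩, ⟨wg1, wg2⟩, ⟨wh1, wh2⟩, ⟨wi1, wi2⟩, ⟨wj1, wj2⟩, ⟨wk1, wk2⟩, ⟨wl1, wl2⟩, ⟨wm1, wm2⟩, ⟨wn1, wn2⟩, ⟨wo1, wo2⟩, ⟨wp1, wp2⟩, ⟨wq1, wq2⟩, ⟨wr1, wr2⟩, ⟨ws1, ws2⟩, ⟨wt1, wt2⟩, ⟨wu1, wu2⟩, ⟨wv1, wv2⟩, ⟨ww1, ww2⟩, ⟨wx1, wx2⟩, ⟨wy1, wy2⟩, ⟨wz1, wz2⟩⟩ := h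
    have hmem := (pcLetters c).mp hrange
    simp only [List.mem_cons, List.not_mem_nil, or_false] at hmem
    rcases hmem with rfl|rfl|rfl|rfl|rfl|rfl|rfl|rfl|rfl|rfl|rfl|rfl|rfl|rfl|rfl|rfl|rfl|rfl|rfl|rfl|rfl|rfl|rfl|rfl|rfl|rfl|rfl|rfl|rfl|rfl|rfl|rfl|rfl|rfl|rfl|rfl|rfl|rfl|rfl|rfl|rfl|rfl|rfl|rfl|rfl|rfl|rfl|rfl|rfl|rfl|rfl|rfl
    · exact wa1 hcm
    · exact wa2 hcm
    · exact wb1 hcm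
    · exact wb2 hcm
    · exact wc1 hcm
    · exact wc2 hcm
    · exact wd1 hcm
    · exact wd2 hcm
    · exact we1 hcm
    · exact we2 hcm
    · exact wf1 hcm
    · exact wf2 hcm
    · exact wg1 hcm
    · exact wg2 hcm
    · exact wh1 hcm
    · exact wh2 hcm
    · exact wi1 hcm
    · exact wi2 hcm
    · exact wj1 hcm
    · exact wj2 hcm
    · exact wk1 hcm
    · exact wk2 hcm
    · exact wl1 hcm
    · exact wl2 hcm
    · exact wm1 hcm
    · exact wm2 hcm
    · exact wn1 hcm
    · exact wn2 hcm
    · exact wo1 hcm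
    · exact wo2 hcm
    · exact wp1 hcm
    · exact wp2 hcm
    · exact wq1 hcm
    · exact wq2 hcm
    · exact wr1 hcm
    · exact wr2 hcm
    · exact ws1 hcm
    · exact ws2 hcm
    · exact wt1 hcm
    · exact wt2 hcm
    · exact wu1 hcm
    · exact wu2 hcm
    · exact wv1 hcm
    · exact wv2 hcm
    · exact ww1 hcm
    · exact ww2 hcm
    · exact wx1 hcm
    · exact wx2 hcm
    · exact wy1 hcm
    · exact wy2 hcm
    · exact wz1 hcm
    · exact wz2 hcm
  · intro h
    exact ⟨⟨fun hm => (h _ hm).1 (by decide), fun hm => (h _ hm).2 (by decide)⟩, ⟨fun hm => (h _ hm).1 (by decide), fun hm => (h _ hm).2 (by decide)⟩, ⟨fun hm => (h _ hm).1 (by decide), fun hm => (h _ hm).2 (by decide)⟩, ⟨fun hm => (h _ hm).1 (by decide), fun hm => (h _ hm).2 (by decide)⟩, ⟨fun hm => (h _ hm).1 (by decide), fun hm => (h _ hm).2 (by decide)⟩, ⟨fun hm => (h _ hm).1 (by decide), fun hm => (h _ hm).2 (by decide)⟩, ⟨fun hm => (h _ hm).1 (by decide), fun hm => (h _ hm).2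 (by decide)⟩, ⟨fun hm => (h _ hm).1 (by decide), fun hm => (h _ hm).2 (by decide)⟩, ⟨fun hm => (h _ hm).1 (by decide), fun hm => (h _ hm).2 (by decide)⟩, ⟨fun hm => (h _ hm).1 (by decide), fun hm => (h _ hm).2 (by decide)⟩, ⟨fun hm => (h _ hm).1 (by decide), fun hm => (h _ hm).2 (by decide)⟩, ⟨fun hm => (h _ hm).1 (by decide), fun hm => (h _ hm).2 (by decide)⟩, ⟨fun hm => (h _ hm).1 (by decide), fun hm => (h _ hm).2 (by decide)⟩, ⟨fun hm => (h _ hm).1 (by decide), fun hm => (h _ hm).2 (by decide)⟩, ⟨fun hm => (h _ hm).1 (by decide), fun hm => (h _ hm).2 (by decide)⟩, ⟨fun hm => (h _ hm).1 (by decide), fun hm => (h _ hm).2 (by decide)⟩, ⟨fun hm => (h _ hm).1 (by decide), fun hm => (h _ hm).2 (by decide)⟩, ⟨fun hm => (h _ hm).1 (by decide), fun hm => (h _ hm).2 (by decide)⟩, ⟨fun hm => (h _ hm).1 (by decide), fun hm => (h _ hm).2 (by decide)⟩, ⟨fun hm => (h _ hm).1 (by decide), fun hm => (h _ hm).2 (by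 decide)⟩, ⟨fun hm => (h _ hm).1 (by decide), fun hm => (h _ hm).2 (by decide)⟩, ⟨fun hm => (h _ hm).1 (by decide), fun hm => (h _ hm).2 (by decide)⟩, ⟨fun hm => (h _ hm).1 (by decide), fun hm => (h _ hm).2 (by decide)⟩, ⟨fun hm => (h _ hm).1 (by decide), fun hm => (h _ hm).2 (by decide)⟩, ⟨fun hm => (h _ hm).1 (by decide), fun hm => (h _ hm).2 (by decide)⟩, ⟨fun hm => (h _ hm).1 (by decide), fun hm => (h _ hm).2 (by decide)⟩⟩

-- ===== VERDICT (by name: the statement is the Claim_ definition above) =====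
theorem phone_checker_spec : Claim_equal_phone_checker := by
  intro s _
  unfold Spec_phone_checker
  exact pc_eq s
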